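-- pv_equiv track=rewrite | github.com/geb2701/ALGORITMOS-Y-ESTRUCTURAS-DE-DATOS-I | Unidad 3 Matrices/Ejercicio 2/GustavoBruno.py | MatrizF
-- ===== SOURCE A (Python) =====
-- def MatrizF(n):
--     nuevaMatriz = []
--
--     valor = 0
--     for i in range (n):
--         nuevaMatriz.append([])
--         for j in range (n):
--             nuevaMatriz[i].append(0)
--
--         cantidad = i + 1
--         cantidadActual = 0
--         for j in range (n -1, -1, -1):
--             if cantidad > cantidadActual:
--                 valor += 1
--                 nuevaMatriz[i][j] = valor
--                 cantidadActual += 1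
--             else:
--                 break
--
--     return nuevaMatriz
-- ===== SOURCE B (Python) =====
-- def MatrizF(n):
--     return [[0 if j < n - i - 1 else i * (i + 1) // 2 + (n - j) for j in range(n)]
--             for i in range(n)]
-- ===== Notes on version B (the rewrite author's own statement) =====
-- stated objective: simpler
-- what changed: Replaced the zero-fill-then-overwrite construction with a global counter and a break-controlled reverse scan by a single nested comprehension that computes each cell in closed form (0 below the anti-diagonal, i*(i+1)//2 + (n-j) on and above it).
import Mathlib
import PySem

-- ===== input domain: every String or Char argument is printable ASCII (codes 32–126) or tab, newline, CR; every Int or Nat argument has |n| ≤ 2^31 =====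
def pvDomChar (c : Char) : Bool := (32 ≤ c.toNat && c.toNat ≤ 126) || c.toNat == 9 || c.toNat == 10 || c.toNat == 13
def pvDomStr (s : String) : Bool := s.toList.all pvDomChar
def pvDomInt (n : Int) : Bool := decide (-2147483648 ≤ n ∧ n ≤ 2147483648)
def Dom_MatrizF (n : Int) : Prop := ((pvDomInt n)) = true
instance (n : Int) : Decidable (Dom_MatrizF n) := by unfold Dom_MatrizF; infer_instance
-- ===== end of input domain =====

-- B replaces A's zero-fill-then-overwrite loops (with a global counter and a break)
-- by a nested comprehension computing each cell in closed form (objective: simpler).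

-- ===== PORT A =====
-- the inner 'for j in range(n-1,-1,-1): if cantidad > cantidadActual: … else: break' loop;
-- state = (current row, valor); returns on break or list exhaustion
def MatrizF_inner : List Int → List Int → Int → Int → Int → List Int × Int
  | [], row, valor, _, _ => (row, valor)
  | j :: rest, row, valor, cantidad, cantidadActual =>
    if cantidad > cantidadActual then
      MatrizF_inner rest (PySem.List.pySetD row j (valor + 1)) (valor + 1) cantidad (cantidadActual + 1)
    else (row, valor)

def MatrizF (n : Int) : List (List Int) :=
  let st := (PySem.List.pyRange 0 n 1).foldl
    (fun (st : List (List Int) × Int) i =>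
      -- append a row of zeros: nuevaMatriz.append([]); for j in range(n): append(0)
      let row := (PySem.List.pyRange 0 n 1).foldl (fun (r : List Int) _ => r ++ [(0 : Int)]) []
      let p := MatrizF_inner (PySem.List.pyRange (n - 1) (-1) (-1)) row st.2 (i + 1) 0
      (st.1 ++ [p.1], p.2))
    ([], 0)
  st.1

-- ===== PORT B =====
def MatrizF_alt (n : Int) : List (List Int) :=
  (PySem.List.pyRange 0 n 1).map (fun i =>
    (PySem.List.pyRange 0 n 1).map (fun j =>
      if j < n - i - 1 then 0 else PySem.Int.floordiv (i * (i + 1)) 2 + (n - j)))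

-- ===== PRECONDITION & SPEC =====
def Spec_MatrizF (n : Int) (out : List (List Int)) : Prop := out = MatrizF_alt n
instance (n : Int) (out : List (List Int)) : Decidable (Spec_MatrizF n out) := by unfold Spec_MatrizF; infer_instance

-- ===== CLAIM (what is proved, stated in full; the proofs are below) =====
def Claim_equal_MatrizF : Prop := ∀ (n : Int), Dom_MatrizF n → Spec_MatrizF n (MatrizF n)

-- ===== LEMMAS AND PROOFS =====

-- setting index a (0 ≤ a < n) of a range-indexed map updates the function at a
lemma pySetD_map_pyRange (n a v : Int) (g : Int → Int) (h0 : 0 ≤ a) (h1 : a < n) :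
    PySem.List.pySetD ((PySem.List.pyRange 0 n 1).map g) a v =
      (PySem.List.pyRange 0 n 1).map (fun j => if j = a then v else g j) := by
  rw [PySem.List.pySetD_of_nonneg _ _ h0]
  apply List.ext_getElem
  · simp
  · intro k hk hk'
    simp only [List.getElem_set, List.getElem_map, PySem.List.getElem_pyRange_one]
    have hkn : (k : Int) < n := by
      have hlen := hk; simp [PySem.List.length_pyRange_one] at hlen; omega
    have _ := h1
    by_cases hka : k = a.toNat
    · simp [hka, Int.toNat_of_nonneg h0]
    · have h2 : ¬ ((0 : Int) + (k : Int) = a) := by omega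
      have h3 : ¬ (a.toNat = k) := by omega
      rw [if_neg h3, if_neg h2]

-- characterization of the break loop: starting from a range-indexed row, it writes
-- valor+1, valor+2, … into indices a, a-1, … until cantidadActual reaches cantidad
lemma inner_spec (n c : Int) : ∀ (r : Nat), ∀ (a v cA : Int) (g : Int → Int),
    c - cA = (r : Int) → a < n → (r : Int) ≤ a + 1 →
    MatrizF_inner (PySem.List.pyRange a (-1) (-1)) ((PySem.List.pyRange 0 n 1).map g) v c cA =
      ((PySem.List.pyRange 0 n 1).map
        (fun j => if a - (r : Int) < j ∧ j ≤ a then v + (a - j) + 1 else g j), v + (r : Int)) := by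
  intro r
  induction r with
  | zero =>
    intro a v cA g hc _ _
    rcases h : PySem.List.pyRange a (-1) (-1) with _ | ⟨j, rest⟩
    · simp [MatrizF_inner]
    · have hng : ¬ c > cA := by omega
      simp [MatrizF_inner, hng]
  | succ r ih =>
    intro a v cA g hc han har
    have ha0 : 0 ≤ a := by push_cast at har; omega
    have hcons : PySem.List.pyRange a (-1) (-1) = a :: PySem.List.pyRange (a - 1) (-1) (-1) :=
      PySem.List.pyRange_neg_one_cons (by omega)
    have hgt : c > cA := by push_cast at hc; omega
    rw [hcons]
    simp only [MatrizF_inner, if_pos hgt]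
    rw [pySetD_map_pyRange n a (v + 1) g ha0 han]
    rw [ih (a - 1) (v + 1) (cA + 1) (fun j => if j = a then v + 1 else g j)
      (by push_cast at hc ⊢; omega) (by omega) (by push_cast at har ⊢; omega)]
    simp only [Prod.mk.injEq]
    constructor
    · apply List.map_congr_left; intro j _
      by_cases hja : j = a
      · subst hja
        rw [if_neg (by omega), if_pos rfl, if_pos (by constructor <;> push_cast <;> omega)]
        ring
      · by_cases hin : a - 1 - (r : Int) < j ∧ j ≤ a - 1
        · rw [if_pos hin, if_pos (by push_cast; omega)]; ring
        · rw [if_neg hin, if_neg hja, if_neg (by push_cast at hin ⊢; omega)]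
    · push_cast; ring

-- the triangular-number step: i*(i+1)//2 + (i+1) = (i+1)*(i+2)//2
lemma tri_step (i : Int) :
    PySem.Int.floordiv (i * (i + 1)) 2 + (i + 1) = PySem.Int.floordiv ((i + 1) * (i + 1 + 1)) 2 := by
  obtain ⟨t, ht⟩ := Int.even_mul_succ_self i
  have h2 : (i + 1) * (i + 1 + 1) = i * (i + 1) + 2 * (i + 1) := by ring
  rw [PySem.Int.floordiv_eq_ediv_of_pos (by norm_num), PySem.Int.floordiv_eq_ediv_of_pos (by norm_num),
      h2, ht]
  omega

-- outer loop invariant: after k rows, the matrix is B's first k rows and valor = T_k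
lemma outer_spec (n : Int) : ∀ (k : Nat), (k : Int) ≤ n →
    (PySem.List.pyRange 0 (k : Int) 1).foldl
      (fun (st : List (List Int) × Int) i =>
        let row := (PySem.List.pyRange 0 n 1).foldl (fun (r : List Int) _ => r ++ [(0 : Int)]) []
        let p := MatrizF_inner (PySem.List.pyRange (n - 1) (-1) (-1)) row st.2 (i + 1) 0
        (st.1 ++ [p.1], p.2))
      ([], 0) =
    ((PySem.List.pyRange 0 (k : Int) 1).map (fun i =>
        (PySem.List.pyRange 0 n 1).map (fun j =>
          if j < n - i - 1 then 0 else PySem.Int.floordiv (i * (i + 1)) 2 + (n - j))),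
      PySem.Int.floordiv ((k : Int) * ((k : Int) + 1)) 2) := by
  intro k
  induction k with
  | zero =>
    intro _
    simp [PySem.List.pyRange_one_eq_nil (by omega : (0:Int) ≤ 0)]
  | succ k ih =>
    intro hk
    have hk' : (k : Int) ≤ n := by push_cast at hk ⊢; omega
    have hkn : (k : Int) < n := by push_cast at hk; omega
    have hsplit : PySem.List.pyRange 0 ((k : Int) + 1) 1
        = PySem.List.pyRange 0 (k : Int) 1 ++ [(k : Int)] :=
      PySem.List.pyRange_one_succ_right (by omega)
    push_cast
    rw [hsplit, List.foldl_append, ih hk', List.map_append]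
    simp only [List.foldl_cons, List.foldl_nil, List.map_cons, List.map_nil]
    rw [PySem.List.foldl_append_singleton_eq_map (f := fun _ => (0 : Int))]
    rw [List.nil_append]
    rw [inner_spec n ((k : Int) + 1) (k + 1) (n - 1)
        (PySem.Int.floordiv ((k : Int) * ((k : Int) + 1)) 2) 0 (fun _ => 0)
        (by push_cast; omega) (by omega) (by push_cast; omega)]
    simp only [Prod.mk.injEq]
    push_cast
    constructor
    · congr 1
      congr 1
      apply List.map_congr_left; intro j hj
      rw [PySem.List.mem_pyRange_one] at hj
      by_cases hc : j < n - (k : Int) - 1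
      · rw [if_neg (by omega), if_pos hc]
      · rw [if_pos (by constructor <;> omega), if_neg hc]
        ring
    · rw [tri_step]

-- ===== VERDICT (by name: the statement is the Claim_ definition above) =====
theorem MatrizF_spec : Claim_equal_MatrizF := by
  intro n _
  unfold Spec_MatrizF MatrizF MatrizF_alt
  by_cases hn : 0 ≤ n
  · have h := outer_spec n n.toNat (by omega)
    rw [Int.toNat_of_nonneg hn] at h
    simp only [h]
  · rw [PySem.List.pyRange_one_eq_nil (by omega)]
    simp
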